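-- pv_equiv track=rewrite | github.com/Chenlu-Y/FlashVSR_Ultra_Fast | scripts/infer_video.py | calculate_tile_coords
-- ===== SOURCE A (Python) =====
-- import math
--
-- def calculate_tile_coords(height, width, tile_size, overlap):
--     """Calculate tile coordinates for patch-based inference."""
--     coords = []
--     stride = tile_size - overlap
--     num_rows = math.ceil((height - overlap) / stride)
--     num_cols = math.ceil((width - overlap) / stride)
--     for r in range(num_rows):
--         for c in range(num_cols):
--             y1, x1 = r * stride, c * stride
--             y2, x2 = min(y1 + tile_size, height), min(x1 + tile_size, width)
--             if y2 - y1 < tile_size: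
--                 y1 = max(0, y2 - tile_size)
--             if x2 - x1 < tile_size:
--                 x1 = max(0, x2 - tile_size)
--             coords.append((x1, y1, x2, y2))
--     return coords
-- ===== SOURCE B (Python) =====
-- import math
--
-- def calculate_tile_coords(height, width, tile_size, overlap):
--     """Calculate tile coordinates for patch-based inference."""
--     stride = tile_size - overlap
--     num_rows = math.ceil((height - overlap) / stride)
--     num_cols = math.ceil((width - overlap) / stride)
--     if num_rows <= 0 or num_cols <= 0:
--         return []
--
--     def axis_span(i, limit):
--         lo = i * stride
--         hi = min(lo + tile_size, limit)
--         if hi - lo < tile_size: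
--             lo = max(0, hi - tile_size)
--         return (lo, hi)
--
--     row_spans = [axis_span(r, height) for r in range(num_rows)]
--     col_spans = [axis_span(c, width) for c in range(num_cols)]
--     return [(x1, y1, x2, y2) for (y1, y2) in row_spans for (x1, x2) in col_spans]
-- ===== Notes on version B (the rewrite author's own statement) =====
-- stated objective: alternative
-- what changed: A recomputes both axes' clamped tile bounds inside every cell of a nested loop; B builds the row spans and column spans in two independent 1D passes and emits the grid as their Cartesian product.
import Mathlib
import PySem

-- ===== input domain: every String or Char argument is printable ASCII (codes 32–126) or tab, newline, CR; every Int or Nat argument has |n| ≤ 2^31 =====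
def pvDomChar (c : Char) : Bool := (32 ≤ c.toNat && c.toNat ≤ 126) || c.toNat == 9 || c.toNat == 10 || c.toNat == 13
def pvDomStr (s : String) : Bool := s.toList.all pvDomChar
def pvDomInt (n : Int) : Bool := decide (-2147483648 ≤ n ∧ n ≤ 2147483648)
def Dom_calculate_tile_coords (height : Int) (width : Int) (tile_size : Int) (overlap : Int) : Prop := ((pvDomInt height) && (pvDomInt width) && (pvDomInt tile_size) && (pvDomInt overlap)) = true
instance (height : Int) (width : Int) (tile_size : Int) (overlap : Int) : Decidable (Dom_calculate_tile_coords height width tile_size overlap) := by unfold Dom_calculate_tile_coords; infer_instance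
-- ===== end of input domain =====

-- B replaces A's per-cell recomputation by two 1D per-axis span builds combined as a
-- Cartesian product (objective: alternative decomposition, same asymptotic cost).

-- ===== PORT A =====
-- math.ceil((a)/stride) on floats equals the exact integer ceiling -((-a)//stride)
-- throughout Dom (|args| ≤ 2^31 keeps the float quotient within ceiling-exactness).
def calculate_tile_coords (height : Int) (width : Int) (tile_size : Int) (overlap : Int) : List (Int × Int × Int × Int) :=
  let stride := tile_size - overlap
  let num_rows := -(PySem.Int.floordiv (-(height - overlap)) stride)
  let num_cols := -(PySem.Int.floordiv (-(width - overlap)) stride)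
  (PySem.List.pyRange 0 num_rows 1).foldl (fun coords r =>
    (PySem.List.pyRange 0 num_cols 1).foldl (fun coords c =>
      let y1 := r * stride
      let x1 := c * stride
      let y2 := min (y1 + tile_size) height
      let x2 := min (x1 + tile_size) width
      let y1' := if y2 - y1 < tile_size then max 0 (y2 - tile_size) else y1
      let x1' := if x2 - x1 < tile_size then max 0 (x2 - tile_size) else x1
      coords ++ [(x1', y1', x2, y2)]) coords) []

-- ===== PORT B =====
def pvAxisSpan (stride : Int) (tile_size : Int) (i : Int) (limit : Int) : Int × Int :=
  let lo := i * stride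
  let hi := min (lo + tile_size) limit
  let lo' := if hi - lo < tile_size then max 0 (hi - tile_size) else lo
  (lo', hi)

def calculate_tile_coords_alt (height : Int) (width : Int) (tile_size : Int) (overlap : Int) : List (Int × Int × Int × Int) :=
  let stride := tile_size - overlap
  let num_rows := -(PySem.Int.floordiv (-(height - overlap)) stride)
  let num_cols := -(PySem.Int.floordiv (-(width - overlap)) stride)
  if num_rows ≤ 0 ∨ num_cols ≤ 0 then [] else
  let row_spans := (PySem.List.pyRange 0 num_rows 1).map (fun r => pvAxisSpan stride tile_size r height)
  let col_spans := (PySem.List.pyRange 0 num_cols 1).map (fun c => pvAxisSpan stride tile_size c width)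
  row_spans.flatMap (fun p => col_spans.map (fun q => (q.1, p.1, q.2, p.2)))

-- ===== PRECONDITION & SPEC =====
-- Pre_ excludes stride = 0 (tile_size = overlap), where Python A raises ZeroDivisionError.
def Pre_calculate_tile_coords (height : Int) (width : Int) (tile_size : Int) (overlap : Int) : Prop := tile_size ≠ overlap
instance (height : Int) (width : Int) (tile_size : Int) (overlap : Int) : Decidable (Pre_calculate_tile_coords height width tile_size overlap) := by unfold Pre_calculate_tile_coords; infer_instance

def pvWitness_calculate_tile_coords : Int × Int × Int × Int := (100, 100, 64, 16)

def Spec_calculate_tile_coords (height : Int) (width : Int) (tile_size : Int) (overlap : Int) (out : List (Int × Int × Int × Int)) : Prop := out = calculate_tile_coords_alt height width tile_size overlap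
instance (height : Int) (width : Int) (tile_size : Int) (overlap : Int) (out : List (Int × Int × Int × Int)) : Decidable (Spec_calculate_tile_coords height width tile_size overlap out) := by unfold Spec_calculate_tile_coords; infer_instance

-- ===== CLAIM (what is proved, stated in full; the proofs are below) =====
def Claim_equal_calculate_tile_coords : Prop := ∀ (height : Int) (width : Int) (tile_size : Int) (overlap : Int), Dom_calculate_tile_coords height width tile_size overlap → Pre_calculate_tile_coords height width tile_size overlap → Spec_calculate_tile_coords height width tile_size overlap (calculate_tile_coords height width tile_size overlap)

-- ===== LEMMAS AND PROOFS =====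

theorem pv_nested {α β γ : Type} (rows cols : List Int) (fr : Int → α) (fc : Int → β) (g : α → β → γ) :
    rows.foldl (fun acc r => cols.foldl (fun acc c => acc ++ [g (fr r) (fc c)]) acc) []
      = (rows.map fr).flatMap (fun p => (cols.map fc).map (fun q => g p q)) := by
  suffices h : ∀ acc : List γ,
      rows.foldl (fun acc r => cols.foldl (fun acc c => acc ++ [g (fr r) (fc c)]) acc) acc
        = acc ++ (rows.map fr).flatMap (fun p => (cols.map fc).map (fun q => g p q)) by
    simpa using h []
  induction rows with
  | nil => intro acc; simp
  | cons r rs ih =>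
    intro acc
    rw [List.foldl_cons, ih, PySem.List.foldl_append_singleton_eq_map]
    simp [List.map_map, List.append_assoc, Function.comp]

theorem pv_main (height width tile_size overlap : Int) :
    calculate_tile_coords height width tile_size overlap
      = calculate_tile_coords_alt height width tile_size overlap := by
  unfold calculate_tile_coords calculate_tile_coords_alt pvAxisSpan
  refine Eq.trans (pv_nested
    (PySem.List.pyRange 0 (-PySem.Int.floordiv (-(height - overlap)) (tile_size - overlap)) 1)
    (PySem.List.pyRange 0 (-PySem.Int.floordiv (-(width - overlap)) (tile_size - overlap)) 1)
    (fun r =>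
      ((if min (r * (tile_size - overlap) + tile_size) height - r * (tile_size - overlap) < tile_size
          then max 0 (min (r * (tile_size - overlap) + tile_size) height - tile_size)
          else r * (tile_size - overlap)),
        min (r * (tile_size - overlap) + tile_size) height))
    (fun c =>
      ((if min (c * (tile_size - overlap) + tile_size) width - c * (tile_size - overlap) < tile_size
          then max 0 (min (c * (tile_size - overlap) + tile_size) width - tile_size)
          else c * (tile_size - overlap)),
        min (c * (tile_size - overlap) + tile_size) width))
    (fun p q => (q.1, p.1, q.2, p.2))) ?_
  by_cases hg : -PySem.Int.floordiv (-(height - overlap)) (tile_size - overlap) ≤ 0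
      ∨ -PySem.Int.floordiv (-(width - overlap)) (tile_size - overlap) ≤ 0
  · rw [if_pos hg]
    rcases hg with h | h
    · rw [PySem.List.pyRange_one_eq_nil h]; simp
    · rw [PySem.List.pyRange_one_eq_nil h]; simp
  · rw [if_neg hg]

-- ===== VERDICT (by name: the statement is the Claim_ definition above) =====
theorem calculate_tile_coords_spec : Claim_equal_calculate_tile_coords := by
  intro h w t o _ _
  unfold Spec_calculate_tile_coords
  exact pv_main h w t o
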